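-- pv_equiv track=rewrite | github.com/porcherface/conec-for | interact/render/int2board.py | int2board
-- ===== SOURCE A (Python) =====
-- NUM_ROW = 10
--
-- NUM_COL = 10
--
-- def valueAt(board, col, row):
-- 	return (board >> 2 *(col + NUM_COL * row) ) % 4
--
-- def int2board(value):
-- 	board = []
-- 	for x in range(NUM_ROW):
-- 		row = []
-- 		for y in range(NUM_COL):
-- 			val = valueAt(value, y, NUM_ROW - x - 1)
-- 			row.append(val)
-- 		board.append(row)
-- 	return board
-- ===== SOURCE B (Python) =====
-- NUM_ROW = 10
--
-- NUM_COL = 10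
--
-- def int2board(value):
--     # one pass: flat list of 100 base-4 digits, then reshape and flip row order
--     digits = []
--     v = value
--     for _ in range(100):
--         digits.append(v % 4)
--         v //= 4
--     rows = [digits[r * 10:(r + 1) * 10] for r in range(10)]
--     return rows[::-1]
-- ===== Notes on version B (the rewrite author's own statement) =====
-- stated objective: alternative
-- what changed: Instead of recomputing an absolute shift of the whole integer for every cell (valueAt), B extracts all base-4 digits in one pass over a running value (v % 4, v //= 4), then reshapes the flat digit list into rows and reverses the row order.
import Mathlib
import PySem

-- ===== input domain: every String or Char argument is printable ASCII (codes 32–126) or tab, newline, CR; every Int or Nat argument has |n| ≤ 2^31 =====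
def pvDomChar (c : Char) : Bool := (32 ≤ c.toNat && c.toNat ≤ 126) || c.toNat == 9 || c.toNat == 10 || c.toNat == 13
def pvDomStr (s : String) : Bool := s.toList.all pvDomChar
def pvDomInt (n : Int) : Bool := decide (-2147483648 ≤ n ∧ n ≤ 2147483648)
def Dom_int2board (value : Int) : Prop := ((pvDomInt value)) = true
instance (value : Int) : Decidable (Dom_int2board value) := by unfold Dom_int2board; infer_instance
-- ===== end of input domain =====

set_option maxRecDepth 100000
set_option maxHeartbeats 1000000


-- B decodes the board's base-4 digits in one running-value pass, then reshapes into rows and flips; same values as A (objective: alternative decomposition).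

-- ===== PORT A =====
-- Python '>>' on Int is Lean '>>>' (exact, also on negatives); '%' is PySem.Int.mod.
-- A only calls valueAt with col,row inside the board, so the shift amount is nonnegative and .toNat is exact here.
def valueAt (board : Int) (col : Int) (row : Int) : Int :=
  PySem.Int.mod (board >>> (2 * (col + 10 * row)).toNat) 4

def int2board (value : Int) : List (List Int) :=
  (PySem.List.pyRange 0 10 1).foldl (fun board x =>
    board ++ [(PySem.List.pyRange 0 10 1).foldl (fun row y =>
      row ++ [valueAt value y (10 - x - 1)]) []]) []

-- ===== PORT B =====
-- the for-loop of Source B: for each cell emit v % 4 and replace v by v // 4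
def digitsLoop (n : Nat) (v : Int) : List Int :=
  match n with
  | 0 => []
  | n + 1 => PySem.Int.mod v 4 :: digitsLoop n (PySem.Int.floordiv v 4)

def int2board_alt (value : Int) : List (List Int) :=
  let digits := digitsLoop 100 value
  let rows := (PySem.List.pyRange 0 10 1).map (fun r =>
    PySem.List.slice digits (some (r * 10)) (some ((r + 1) * 10)))
  rows.reverse  -- rows[::-1] (PySem.List.slice?_none_none_neg_one: s[::-1] is reverse)

-- ===== PRECONDITION & SPEC =====
def Spec_int2board (value : Int) (out : List (List Int)) : Prop := out = int2board_alt value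
instance (value : Int) (out : List (List Int)) : Decidable (Spec_int2board value out) := by unfold Spec_int2board; infer_instance

-- ===== CLAIM (what is proved, stated in full; the proofs are below) =====
def Claim_equal_int2board : Prop := ∀ (value : Int), Dom_int2board value → Spec_int2board value (int2board value)

-- ===== LEMMAS AND PROOFS =====

-- the i-th base-4 digit of v
def pvCell (v : Int) (i : Nat) : Int := PySem.Int.mod (v / 4 ^ i) 4

-- an append-accumulating foldl is a map
theorem foldl_push {α β : Type} (f : α → β) (xs : List α) (init : List β) :
    xs.foldl (fun acc x => acc ++ [f x]) init = init ++ xs.map f := by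
  induction xs generalizing init with
  | nil => simp
  | cons a xs ih => simp [ih]

theorem pyR : PySem.List.pyRange 0 10 1 = (List.range 10).map (fun n : Nat => (n : Int)) := by decide

theorem digits_char (n : Nat) (v : Int) : digitsLoop n v = (List.range n).map (pvCell v) := by
  induction n generalizing v with
  | zero => simp [digitsLoop]
  | succ n ih =>
    have hc : ∀ i : Nat, pvCell (v / 4) i = pvCell v (i + 1) := by
      intro i
      unfold pvCell
      have hdd : v / 4 / 4 ^ i = v / (4 * 4 ^ i) := Int.ediv_ediv_of_nonneg (by norm_num)
      rw [hdd, ← pow_succ']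
    have h0 : pvCell v 0 = PySem.Int.mod v 4 := by simp [pvCell]
    rw [List.range_succ_eq_map]
    simp [digitsLoop, ih, h0, Function.comp, hc]

theorem cellA (v : Int) (x y : Nat) (hx : x < 10) :
    valueAt v (y : Int) (10 - (x : Int) - 1) = pvCell v (y + 10 * (9 - x)) := by
  unfold valueAt pvCell
  have harg : (2 * ((y : Int) + 10 * (10 - (x : Int) - 1))).toNat = 2 * (y + 10 * (9 - x)) := by
    omega
  rw [harg, Int.shiftRight_eq_div_pow, pow_mul]
  norm_num

theorem A_char (v : Int) :
    int2board v =
      (List.range 10).map (fun x => (List.range 10).map (fun y => pvCell v (y + 10 * (9 - x)))) := by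
  unfold int2board
  simp only [pyR, foldl_push, List.map_map, List.nil_append]
  apply List.map_congr_left
  intro x hx
  apply List.map_congr_left
  intro y _
  exact cellA v x y (List.mem_range.mp hx)

theorem rowB (v : Int) (r : Nat) (hr : r < 10) :
    PySem.List.slice ((List.range 100).map (pvCell v)) (some ((r : Int) * 10)) (some (((r : Int) + 1) * 10)) =
      (List.range 10).map (fun y => pvCell v (y + 10 * r)) := by
  have h1 : ((r : Int) * 10) = ((r * 10 : Nat) : Int) := by push_cast; ring
  have h2 : (((r : Int) + 1) * 10) = ((r * 10 : Nat) : Int) + ((10 : Nat) : Int) := by push_cast; ring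
  rw [h1, h2, PySem.List.slice_natCast_add]
  apply List.ext_getElem
  · simp; omega
  · intro i hi1 hi2
    have hlt : r * 10 + i < 100 := by
      simp at hi1
      omega
    simp [List.getElem_take, List.getElem_drop, List.getElem_map, List.getElem_range]
    congr 1
    omega

theorem B_char (v : Int) :
    int2board_alt v =
      ((List.range 10).map (fun r => (List.range 10).map (fun y => pvCell v (y + 10 * r)))).reverse := by
  unfold int2board_alt
  simp only [digits_char, pyR, List.map_map]
  exact congrArg List.reverse (List.map_congr_left (fun r hr => rowB v r (List.mem_range.mp hr)))

theorem int2board_eq_alt (v : Int) : int2board v = int2board_alt v := by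
  rw [A_char, B_char, ← List.map_reverse]
  have hrev : (List.range 10).reverse = [9, 8, 7, 6, 5, 4, 3, 2, 1, 0] := by decide
  have hrng : List.range 10 = [0, 1, 2, 3, 4, 5, 6, 7, 8, 9] := by decide
  rw [hrev]
  norm_num [hrng]

-- ===== VERDICT (by name: the statement is the Claim_ definition above) =====
theorem int2board_spec : Claim_equal_int2board := by
  intro value _
  unfold Spec_int2board
  exact int2board_eq_alt value
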